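-- pv_equiv track=rewrite | github.com/bpm-diag/SECT | utilities.py | takeActions
-- ===== SOURCE A (Python) =====
-- def takeActions(allActivities):
--     activities = []
--     for seg in allActivities:
--         for act in seg:
--             if act not in activities:
--                 activities.append(act)
--     sortActivity = sorted(activities)
--     return sortActivity
-- ===== SOURCE B (Python) =====
-- def takeActions(allActivities):
--     flat = []
--     for seg in allActivities:
--         flat.extend(seg)
--     flat = sorted(flat)
--     result = []
--     for x in flat:
--         if not result or result[-1] != x:
--             result.append(x)
--     return result
-- ===== Notes on version B (the rewrite author's own statement) =====
-- stated objective: faster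
-- what changed: Dedup moves from A's repeated 'not in activities' membership scans (quadratic in the number of distinct items) to flattening, one sort, and a single linear adjacent-compare pass over the sorted list.
import Mathlib
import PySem

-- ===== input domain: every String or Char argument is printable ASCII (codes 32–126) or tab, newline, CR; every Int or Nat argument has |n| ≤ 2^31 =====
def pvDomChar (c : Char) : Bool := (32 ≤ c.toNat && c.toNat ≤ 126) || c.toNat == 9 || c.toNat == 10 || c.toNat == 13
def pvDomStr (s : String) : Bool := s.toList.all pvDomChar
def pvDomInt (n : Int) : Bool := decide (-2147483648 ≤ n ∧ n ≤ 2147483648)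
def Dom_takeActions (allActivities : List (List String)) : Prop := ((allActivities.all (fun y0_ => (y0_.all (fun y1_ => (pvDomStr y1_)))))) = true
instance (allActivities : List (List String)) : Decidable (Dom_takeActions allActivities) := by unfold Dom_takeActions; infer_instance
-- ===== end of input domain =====

-- B replaces A's quadratic membership-scan dedup by flatten + one sort + a linear
-- adjacent-compare pass (objective: faster by a constant/asymptotic dedup mechanism).

-- ===== PORT A =====
-- nested loops: for seg in allActivities: for act in seg: if act not in activities: activities.append(act)
def takeActions (allActivities : List (List String)) : List String :=
  let activities :=
    allActivities.foldl
      (fun acc seg => seg.foldl (fun acc2 act => if act ∈ acc2 then acc2 else acc2 ++ [act]) acc)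
      []
  PySem.List.sorted activities (fun x => x)

-- ===== PORT B =====
-- adjacent-dedup step: if not result or result[-1] != x: result.append(x)
def takeActions_alt (allActivities : List (List String)) : List String :=
  let flat := allActivities.foldl (fun acc seg => acc ++ seg) []
  let flatS := PySem.List.sorted flat (fun x => x)
  flatS.foldl (fun res x => if res = [] ∨ res.getLast? ≠ some x then res ++ [x] else res) []

-- ===== PRECONDITION & SPEC =====
def Spec_takeActions (allActivities : List (List String)) (out : List String) : Prop := out = takeActions_alt allActivities
instance (allActivities : List (List String)) (out : List String) : Decidable (Spec_takeActions allActivities out) := by unfold Spec_takeActions; infer_instance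

-- ===== CLAIM (what is proved, stated in full; the proofs are below) =====
def Claim_equal_takeActions : Prop := ∀ (allActivities : List (List String)), Dom_takeActions allActivities → Spec_takeActions allActivities (takeActions allActivities)

-- ===== LEMMAS AND PROOFS =====

-- A's dedup accumulator: nodup and membership
theorem dedupFold_props (xs acc : List String) (hn : acc.Nodup) :
    (xs.foldl (fun acc2 act => if act ∈ acc2 then acc2 else acc2 ++ [act]) acc).Nodup ∧
    (∀ z, z ∈ xs.foldl (fun acc2 act => if act ∈ acc2 then acc2 else acc2 ++ [act]) acc ↔ z ∈ acc ∨ z ∈ xs) := by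
  induction xs generalizing acc with
  | nil => simp [hn]
  | cons x xs ih =>
    simp only [List.foldl_cons]
    by_cases hx : x ∈ acc
    · simp only [if_pos hx]
      rcases ih acc hn with ⟨h1, h2⟩
      refine ⟨h1, fun z => ?_⟩
      rw [h2]
      constructor
      · rintro (h | h) <;> simp_all
      · rintro (h | h)
        · exact Or.inl h
        · rcases List.mem_cons.1 h with rfl | h
          · exact Or.inl hx
          · exact Or.inr h
    · simp only [if_neg hx]
      rcases ih (acc ++ [x]) (by simp [List.nodup_append, hn]; exact fun a ha h => hx (h ▸ ha)) with ⟨h1, h2⟩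
      refine ⟨h1, fun z => ?_⟩
      rw [h2]
      simp only [List.mem_append, List.mem_cons]
      tauto

-- A's nested loop is the dedup fold over the flattened list
theorem nestedFold_eq_flatten (l : List (List String)) :
    l.foldl (fun acc seg => seg.foldl (fun acc2 act => if act ∈ acc2 then acc2 else acc2 ++ [act]) acc) []
      = l.flatten.foldl (fun acc2 act => if act ∈ acc2 then acc2 else acc2 ++ [act]) [] := by
  rw [List.foldl_flatten]

theorem foldl_append_eq_flatten (l : List (List String)) (acc : List String) :
    l.foldl (fun a s => a ++ s) acc = acc ++ l.flatten := by
  induction l generalizing acc with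
  | nil => simp
  | cons s l ih => simp [ih, List.append_assoc]

-- recursive form of B's adjacent-dedup pass, with "previous kept element" y
def adj (y : String) : List String → List String
  | [] => []
  | x :: xs => if x = y then adj y xs else x :: adj x xs

theorem foldl_adj (xs : List String) : ∀ (acc : List String) (y : String), acc.getLast? = some y →
    xs.foldl (fun res x => if res = [] ∨ res.getLast? ≠ some x then res ++ [x] else res) acc
      = acc ++ adj y xs := by
  induction xs with
  | nil => intro acc y _; simp [adj]
  | cons x xs ih =>
    intro acc y hy
    have hacc : acc ≠ [] := by intro h; simp [h] at hy
    simp only [List.foldl_cons, adj]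
    by_cases hxy : x = y
    · subst hxy
      rw [if_neg (by simp [hacc, hy]), if_pos rfl]
      exact ih acc x hy
    · rw [if_pos (by simp [hy, Ne.symm hxy])]
      rw [ih (acc ++ [x]) x (by simp)]
      simp [if_neg hxy]
  
theorem adj_mem_true (y : String) (xs : List String) : adj y (y :: xs) = adj y xs := by
  simp [adj]

theorem adj_props (xs : List String) : ∀ (y : String), xs.Pairwise (· ≤ ·) → (∀ z ∈ xs, y ≤ z) →
    (adj y xs).Pairwise (· < ·) ∧ (∀ z, z ∈ adj y xs ↔ z ∈ xs ∧ z ≠ y) ∧ (∀ z ∈ adj y xs, y < z) := by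
  induction xs with
  | nil => intro y _ _; simp [adj]
  | cons x xs ih =>
    intro y hp hy
    have hx : y ≤ x := hy x (by simp)
    have hxall : ∀ z ∈ xs, x ≤ z := (List.pairwise_cons.1 hp).1
    have hptail : xs.Pairwise (· ≤ ·) := (List.pairwise_cons.1 hp).2
    by_cases hxy : x = y
    · subst hxy
      rcases ih x hptail hxall with ⟨h1, h2, h3⟩
      rw [adj_mem_true]
      refine ⟨h1, fun z => ?_, h3⟩
      rw [h2]
      constructor
      · rintro ⟨hz, hne⟩; exact ⟨by simp [hz], hne⟩
      · rintro ⟨hz, hne⟩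
        rcases List.mem_cons.1 hz with rfl | hz
        · exact absurd rfl hne
        · exact ⟨hz, hne⟩
    · have hylt : y < x := lt_of_le_of_ne hx (Ne.symm hxy)
      rcases ih x hptail hxall with ⟨h1, h2, h3⟩
      have hadj : adj y (x :: xs) = x :: adj x xs := by rw [adj, if_neg hxy]
      rw [hadj]
      have hne_of_mem : ∀ z ∈ xs, z ≠ y := fun z hz =>
        ne_of_gt (lt_of_lt_of_le hylt (hxall z hz))
      refine ⟨List.pairwise_cons.2 ⟨h3, h1⟩, fun z => ?_, ?_⟩
      · simp only [List.mem_cons, h2]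
        constructor
        · rintro (rfl | ⟨hz, hne⟩)
          · exact ⟨Or.inl rfl, Ne.symm (ne_of_lt hylt)⟩
          · exact ⟨Or.inr hz, hne_of_mem z hz⟩
        · rintro ⟨hz, hne⟩
          rcases eq_or_ne z x with rfl | hzx
          · exact Or.inl rfl
          · rcases hz with rfl | hz
            · exact absurd rfl hzx
            · exact Or.inr ⟨hz, hzx⟩
      · intro z hz
        rcases List.mem_cons.1 hz with rfl | hz
        · exact hylt
        · exact lt_trans hylt (h3 z hz)

-- ===== VERDICT (by name: the statement is the Claim_ definition above) =====
theorem takeActions_spec : Claim_equal_takeActions := by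
  intro allActivities _
  unfold Spec_takeActions takeActions takeActions_alt
  simp only []
  rw [nestedFold_eq_flatten, foldl_append_eq_flatten]
  simp only [List.nil_append]
  obtain ⟨hnodup, hmem⟩ := dedupFold_props allActivities.flatten [] (by simp)
  have hsperm := PySem.List.sorted_perm allActivities.flatten (fun x => x) false
  have hspw := PySem.List.sorted_pairwise allActivities.flatten (fun x => x)
  cases hsc : PySem.List.sorted allActivities.flatten (fun x => x) with
  | nil =>
    have hfe : allActivities.flatten = [] := (PySem.List.sorted_eq_nil_iff _ _ _).1 hsc
    rw [hfe]
    rfl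
  | cons x xs =>
    rw [hsc] at hsperm hspw
    have h0 : List.foldl (fun res x => if res = [] ∨ res.getLast? ≠ some x then res ++ [x] else res) [] (x :: xs)
        = List.foldl (fun res x => if res = [] ∨ res.getLast? ≠ some x then res ++ [x] else res) [x] xs := by
      simp
    rw [h0, foldl_adj xs [x] x (by simp)]
    have hxall : ∀ z ∈ xs, x ≤ z := (List.pairwise_cons.1 hspw).1
    rcases adj_props xs x (List.pairwise_cons.1 hspw).2 hxall with ⟨hpw, hmemadj, hlt⟩
    have hBpw : (x :: adj x xs).Pairwise (· < ·) := List.pairwise_cons.2 ⟨hlt, hpw⟩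
    have hBnodup : (x :: adj x xs).Nodup := hBpw.imp ne_of_lt
    have hmemB : ∀ z, z ∈ (x :: adj x xs) ↔ z ∈ allActivities.flatten := by
      intro z
      simp only [List.mem_cons, hmemadj]
      constructor
      · rintro (rfl | ⟨hz, _⟩)
        · exact hsperm.mem_iff.1 (by simp)
        · exact hsperm.mem_iff.1 (by simp [hz])
      · intro hz
        rcases List.mem_cons.1 (hsperm.mem_iff.2 hz) with rfl | hz'
        · exact Or.inl rfl
        · rcases eq_or_ne z x with rfl | hzx
          · exact Or.inl rfl
          · exact Or.inr ⟨hz', hzx⟩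
    have hperm : (x :: adj x xs).Perm
        (allActivities.flatten.foldl (fun acc2 act => if act ∈ acc2 then acc2 else acc2 ++ [act]) []) := by
      rw [List.perm_ext_iff_of_nodup hBnodup hnodup]
      intro z
      rw [hmemB, hmem]
      simp
    exact PySem.List.sorted_eq_of_perm_of_pairwise_lt _ _ (fun x => x) hperm hBpw
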